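-- pv_equiv track=rewrite | github.com/santossilvaisabelly6-cloud/dashboard-presenca07 | app.py | check_reposicao
-- ===== SOURCE A (Python) =====
-- def check_reposicao(row):
--     textos = [
--         str(row.get("obs1", "")).lower(),
--         str(row.get("obs2", "")).lower(),
--         str(row.get("obs3", "")).lower()
--     ]
--
--     palavras_chave = [
--         "repos", "reposição", "remarc",
--         "reagend", "repôs", "reposicao"
--     ]
--
--     return any(
--         any(p in t for p in palavras_chave)
--         for t in textos
--     )
-- ===== SOURCE B (Python) =====
-- def check_reposicao(row):
--     keywords = ["repos", "reposição", "remarc", "reagend", "repôs", "reposicao"]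
--     for field in ("obs1", "obs2", "obs3"):
--         t = str(row.get(field, "")).lower()
--         # single left-to-right pass, NFA-style: 'active' holds the remaining
--         # suffixes of keywords partially matched so far; no per-keyword rescans.
--         active = []
--         for c in t:
--             nxt = []
--             for rem in active + keywords:
--                 if rem and rem[0] == c:
--                     rest = rem[1:]
--                     if not rest:
--                         return True
--                     nxt.append(rest)
--             active = nxt
--     return False
-- ===== Notes on version B (the rewrite author's own statement) =====
-- stated objective: alternative
-- what changed: Replaces the per-keyword nested 'p in t' substring scans (each keyword rescanned against each text) by a single left-to-right pass per text that carries the list of partially-matched keyword remainders, NFA-style, advancing or discarding them at each character and succeeding when a remainder empties.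
import Mathlib
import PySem

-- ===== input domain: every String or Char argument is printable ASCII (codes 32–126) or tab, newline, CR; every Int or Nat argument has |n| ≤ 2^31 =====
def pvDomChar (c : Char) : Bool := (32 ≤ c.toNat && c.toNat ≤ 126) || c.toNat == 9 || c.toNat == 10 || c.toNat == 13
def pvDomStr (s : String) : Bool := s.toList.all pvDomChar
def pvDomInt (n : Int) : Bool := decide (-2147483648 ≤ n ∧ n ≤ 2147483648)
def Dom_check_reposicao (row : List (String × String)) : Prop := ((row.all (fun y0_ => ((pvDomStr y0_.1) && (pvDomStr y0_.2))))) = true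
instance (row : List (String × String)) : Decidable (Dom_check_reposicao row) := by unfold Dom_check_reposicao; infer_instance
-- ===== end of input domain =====

-- B replaces A's per-keyword nested 'p in t' substring scans by a single left-to-right
-- pass over each text that carries the list of partially-matched keyword remainders
-- (an NFA simulation); objective: alternative, no speed claim.

-- ===== PORT A =====
-- textos = [str(row.get(f, "")).lower() for f in ("obs1","obs2","obs3")] (written out as in A)
-- return any(any(p in t for p in palavras_chave) for t in textos)
def check_reposicao (row : List (String × String)) : Bool :=
  let textos : List String :=
    [PySem.Str.lower (PySem.Dict.getD (PySem.Dict.mk row) "obs1" ""),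
     PySem.Str.lower (PySem.Dict.getD (PySem.Dict.mk row) "obs2" ""),
     PySem.Str.lower (PySem.Dict.getD (PySem.Dict.mk row) "obs3" "")]
  let palavras_chave : List String :=
    ["repos", "reposição", "remarc", "reagend", "repôs", "reposicao"]
  textos.any (fun t => palavras_chave.any (fun p => PySem.Str.isIn p t))

-- ===== PORT B =====
-- Body of Source B's inner loop: 'if rem and rem[0] == c: rest = rem[1:];
--   if not rest: return True; nxt.append(rest)' — the Bool flag models the early
-- 'return True' (once set, the remaining iterations are skipped, as Python's return does).
def pvAdvStep (c : Char) (acc : Bool × List (List Char)) (rem : List Char) : Bool × List (List Char) :=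
  if acc.1 then acc
  else
    match rem with
    | [] => acc
    | d :: rest =>
      if d == c then (if rest = [] then (true, acc.2) else (acc.1, acc.2 ++ [rest]))
      else acc

-- 'nxt = []; for rem in active + keywords: …'
def pvAdvance (c : Char) (rems : List (List Char)) : Bool × List (List Char) :=
  rems.foldl (pvAdvStep c) (false, [])

-- 'for c in t: …' over one lowered text, active starting empty
def pvScanStep (kws : List (List Char)) (st : Bool × List (List Char)) (c : Char) : Bool × List (List Char) :=
  if st.1 then st else pvAdvance c (st.2 ++ kws)

def pvScan (kws : List (List Char)) (t : List Char) : Bool :=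
  (t.foldl (pvScanStep kws) (false, [])).1

def check_reposicao_alt (row : List (String × String)) : Bool :=
  let keywords : List (List Char) :=
    ["repos", "reposição", "remarc", "reagend", "repôs", "reposicao"].map String.toList
  ["obs1", "obs2", "obs3"].any (fun field =>
    pvScan keywords (PySem.Chars.lower (PySem.Dict.getD (PySem.Dict.mk row) field "").toList))

-- ===== PRECONDITION & SPEC =====
def Spec_check_reposicao (row : List (String × String)) (out : Bool) : Prop := out = check_reposicao_alt row
instance (row : List (String × String)) (out : Bool) : Decidable (Spec_check_reposicao row out) := by unfold Spec_check_reposicao; infer_instance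

-- ===== CLAIM (what is proved, stated in full; the proofs are below) =====
def Claim_equal_check_reposicao : Prop := ∀ (row : List (String × String)), Dom_check_reposicao row → Spec_check_reposicao row (check_reposicao row)

-- ===== LEMMAS AND PROOFS =====

-- A nonempty suffix of s ++ [c] is v ++ [c] with v a suffix of s.
theorem suffix_concat_iff (u s : List Char) (c : Char) (h : u ≠ []) :
    u <:+ s ++ [c] ↔ ∃ v, u = v ++ [c] ∧ v <:+ s := by
  constructor
  · rintro ⟨w, hw⟩
    have hu : u = u.dropLast ++ [u.getLast h] := (List.dropLast_append_getLast h).symm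
    rw [hu, ← List.append_assoc] at hw
    have hw' : (w ++ u.dropLast).concat (u.getLast h) = s.concat c := by
      simpa [List.concat_eq_append, List.append_assoc] using hw
    have h2 := List.concat_inj.mp hw'
    refine ⟨u.dropLast, ?_, ⟨w, h2.1⟩⟩
    rw [← h2.2]; exact hu
  · rintro ⟨v, rfl, w, hw⟩
    exact ⟨w, by rw [← List.append_assoc, hw]⟩

-- A nonempty infix of s ++ [c] is an infix of s or a suffix of s ++ [c].
theorem infix_concat_iff (p s : List Char) (c : Char) :
    p <:+: s ++ [c] ↔ p <:+: s ∨ p <:+ s ++ [c] := by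
  constructor
  · rintro ⟨u, v, huv⟩
    rcases eq_or_ne v [] with rfl | hv
    · exact Or.inr ⟨u, by simpa using huv⟩
    · refine Or.inl ⟨u, v.dropLast, ?_⟩
      rw [← List.dropLast_append_getLast hv, ← List.append_assoc] at huv
      have huv' : (u ++ p ++ v.dropLast).concat (v.getLast hv) = s.concat c := by
        simpa [List.concat_eq_append, List.append_assoc] using huv
      exact (List.concat_inj.mp huv').1
  · rintro (hp | hp)
    · exact hp.trans ((List.prefix_append s [c]).isInfix)
    · exact hp.isInfix

-- Small-step facts about pvAdvStep.
theorem advStep_frozen (c : Char) (A : List (List Char)) (rem : List Char) :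
    pvAdvStep c (true, A) rem = (true, A) := rfl

theorem advStep_nil (c : Char) (A : List (List Char)) :
    pvAdvStep c (false, A) [] = (false, A) := rfl

theorem advStep_hit (c : Char) (A : List (List Char)) :
    pvAdvStep c (false, A) [c] = (true, A) := by simp [pvAdvStep]

theorem advStep_partial (c : Char) (A : List (List Char)) (rest : List Char) (hr : rest ≠ []) :
    pvAdvStep c (false, A) (c :: rest) = (false, A ++ [rest]) := by simp [pvAdvStep, hr]

theorem advStep_miss (c d : Char) (A : List (List Char)) (rest : List Char) (hd : d ≠ c) :
    pvAdvStep c (false, A) (d :: rest) = (false, A) := by simp [pvAdvStep, hd]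

-- The Bool result of the inner fold: true iff it started true or some remainder is exactly [c].
theorem advFold_fst (c : Char) (rems : List (List Char)) (acc : Bool × List (List Char)) :
    (rems.foldl (pvAdvStep c) acc).1 = (acc.1 || rems.any (fun r => r = [c])) := by
  induction rems generalizing acc with
  | nil => simp
  | cons r rs ih =>
    rw [List.foldl_cons]
    rcases acc with ⟨b, A⟩
    cases b
    · match r with
      | [] => rw [advStep_nil, ih]; simp
      | d :: rest =>
        by_cases hd : d = c
        · subst hd
          rcases eq_or_ne rest [] with rfl | hr
          · rw [advStep_hit, ih]; simp
          · rw [advStep_partial _ _ _ hr, ih]; simp [hr]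
        · rw [advStep_miss _ _ _ _ hd, ih]; simp [hd]
    · rw [advStep_frozen, ih]; simp

-- The list result of the inner fold when nothing completed: the matched remainder tails, in order.
theorem advFold_snd (c : Char) (rems : List (List Char)) (acc : Bool × List (List Char))
    (hacc : acc.1 = false) (hno : rems.any (fun r => r = [c]) = false) :
    (rems.foldl (pvAdvStep c) acc).2
      = acc.2 ++ rems.filterMap (fun r =>
          match r with
          | [] => none
          | d :: rest => if d == c then some rest else none) := by
  induction rems generalizing acc with
  | nil => simp
  | cons r rs ih =>
    rcases acc with ⟨b, A⟩
    simp only at hacc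
    subst hacc
    rw [List.foldl_cons]
    simp only [List.any_cons, Bool.or_eq_false_iff] at hno
    match r with
    | [] => rw [advStep_nil, ih (false, A) rfl hno.2]; simp
    | d :: rest =>
      by_cases hd : d = c
      · subst hd
        have hr : rest ≠ [] := by intro h; subst h; simp at hno
        rw [advStep_partial _ _ _ hr, ih (false, A ++ [rest]) rfl hno.2]
        simp
      · rw [advStep_miss _ _ _ _ hd, ih (false, A) rfl hno.2]
        simp [hd]

-- Membership extraction for the filterMap above.
theorem mem_advFilter (c : Char) (rems : List (List Char)) (rem : List Char) :
    rem ∈ rems.filterMap (fun r =>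
        match r with
        | [] => none
        | d :: rest => if d == c then some rest else none)
      ↔ c :: rem ∈ rems := by
  rw [List.mem_filterMap]
  constructor
  · rintro ⟨a, ha, hmatch⟩
    match a with
    | [] => simp at hmatch
    | d :: rest =>
      by_cases hd : d = c
      · subst hd
        simp only [beq_self_eq_true, if_true, Option.some.injEq] at hmatch
        subst hmatch; exact ha
      · simp [hd] at hmatch
  · intro hmem
    exact ⟨c :: rem, hmem, by simp⟩

-- The invariant carried by Source B's outer loop over one text.
def pvInv (kws : List (List Char)) (s : List Char) (st : Bool × List (List Char)) : Prop :=
  (st.1 = true ↔ ∃ p ∈ kws, p <:+: s) ∧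
  (st.1 = false → ∀ rem, rem ∈ st.2 ↔
      rem ≠ [] ∧ ∃ p ∈ kws, ∃ q, q ≠ [] ∧ p = q ++ rem ∧ q <:+ s)

theorem pvScan_inv (kws : List (List Char)) (hk : ∀ p ∈ kws, p ≠ []) (s : List Char) :
    pvInv kws s (s.foldl (pvScanStep kws) (false, [])) := by
  induction s using List.reverseRecOn with
  | nil =>
    constructor
    · simp only [List.foldl_nil]
      constructor
      · intro h; cases h
      · rintro ⟨p, hp, hinf⟩
        exact absurd (List.infix_nil.mp hinf) (hk p hp)
    · intro _ rem
      simp only [List.foldl_nil, List.not_mem_nil, false_iff, not_and]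
      rintro _ ⟨p, hp, q, hq, rfl, hqs⟩
      exact hq (List.suffix_nil.mp hqs)
  | append_singleton s c ih =>
    rw [List.foldl_append, List.foldl_cons, List.foldl_nil]
    set st := s.foldl (pvScanStep kws) (false, []) with hst
    obtain ⟨ih1, ih2⟩ := ih
    rcases hb : st.1 with _ | _
    · -- not found yet: one pvAdvance step
      have hstep : pvScanStep kws st c = pvAdvance c (st.2 ++ kws) := by
        rw [pvScanStep, hb]; rfl
      rw [hstep]
      have hA := ih2 hb
      have hfst := advFold_fst c (st.2 ++ kws) (false, [])
      rcases hfound : (st.2 ++ kws).any (fun r => r = [c]) with _ | _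
      · -- no keyword completes at this character
        have h1 : (pvAdvance c (st.2 ++ kws)).1 = false := by
          rw [pvAdvance, hfst, hfound]; rfl
        rw [List.any_eq_false] at hfound
        constructor
        · rw [h1]
          simp only [Bool.false_eq_true, false_iff]
          rintro ⟨p, hp, hinf⟩
          rcases (infix_concat_iff p s c).mp hinf with hinf' | hsuf
          · exact absurd (ih1.mpr ⟨p, hp, hinf'⟩) (by simp [hb])
          · obtain ⟨v, rfl, hv⟩ := (suffix_concat_iff p s c (hk p hp)).mp hsuf
            rcases eq_or_ne v [] with rfl | hv0
            · have : [c] ∈ st.2 ++ kws := List.mem_append_right _ (by simpa using hp)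
              simpa using hfound _ this
            · have : [c] ∈ st.2 := (hA [c]).mpr ⟨by simp, v ++ [c], hp, v, hv0, rfl, hv⟩
              simpa using hfound _ (List.mem_append_left _ this)
        · intro _ rem
          have h2 : (pvAdvance c (st.2 ++ kws)).2
              = (st.2 ++ kws).filterMap (fun r =>
                  match r with
                  | [] => none
                  | d :: rest => if d == c then some rest else none) := by
            rw [pvAdvance, advFold_snd c _ _ rfl (List.any_eq_false.mpr hfound)]; rfl
          rw [h2, mem_advFilter]
          have hrem : c :: rem ∈ st.2 ++ kws → rem ≠ [] := by
            intro hmem hnil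
            subst hnil
            simpa using hfound _ hmem
          constructor
          · intro hmem
            refine ⟨hrem hmem, ?_⟩
            rcases List.mem_append.mp hmem with hmem' | hmem'
            · obtain ⟨_, p, hp, q, hq, hpe, hqs⟩ := (hA (c :: rem)).mp hmem'
              refine ⟨p, hp, q ++ [c], by simp, by simpa [List.append_assoc] using hpe, ?_⟩
              obtain ⟨w, hw⟩ := hqs
              exact ⟨w, by rw [← List.append_assoc, hw]⟩
            · exact ⟨c :: rem, hmem', [c], by simp, rfl, List.suffix_append s [c]⟩
          · rintro ⟨hrem0, p, hp, q', hq', rfl, hq's⟩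
            obtain ⟨v, rfl, hv⟩ := (suffix_concat_iff q' s c hq').mp hq's
            rcases eq_or_ne v [] with rfl | hv0
            · exact List.mem_append_right _ (by simpa using hp)
            · exact List.mem_append_left _ ((hA (c :: rem)).mpr
                ⟨by simp, v ++ [c] ++ rem, hp, v, hv0, by simp, hv⟩)
      · -- a keyword completes here: result true, and some keyword is a suffix of s ++ [c]
        have h1 : (pvAdvance c (st.2 ++ kws)).1 = true := by
          rw [pvAdvance, hfst, hfound]; rfl
        constructor
        · rw [h1]
          simp only [true_iff]
          rw [List.any_eq_true] at hfound
          obtain ⟨r, hr, hrc⟩ := hfound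
          have hrc' : r = [c] := by simpa using hrc
          subst hrc'
          rcases List.mem_append.mp hr with hmem | hmem
          · obtain ⟨_, p, hp, q, hq, rfl, hqs⟩ := (hA [c]).mp hmem
            refine ⟨q ++ [c], hp, List.IsSuffix.isInfix ?_⟩
            obtain ⟨w, hw⟩ := hqs
            exact ⟨w, by rw [← List.append_assoc, hw]⟩
          · exact ⟨[c], hmem, (List.suffix_append s [c]).isInfix⟩
        · intro h; rw [h1] at h; cases h
    · -- already found: state frozen, infix is monotone
      have hstep : pvScanStep kws st c = st := by rw [pvScanStep, hb]; rfl
      rw [hstep]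
      constructor
      · rw [hb]
        simp only [true_iff]
        obtain ⟨p, hp, hinf⟩ := ih1.mp hb
        exact ⟨p, hp, hinf.trans ((List.prefix_append s [c]).isInfix)⟩
      · intro h; rw [hb] at h; cases h

-- Per text: Source B's single pass equals A's per-keyword membership test.
theorem pvScan_eq (kws : List (List Char)) (hk : ∀ p ∈ kws, p ≠ []) (t : List Char) :
    pvScan kws t = kws.any (fun p => PySem.Chars.isIn p t) := by
  obtain ⟨h1, _⟩ := pvScan_inv kws hk t
  rcases hb : pvScan kws t with _ | _
  · symm
    rw [List.any_eq_false]
    intro p hp hin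
    have hinf : p <:+: t := (PySem.Chars.isIn_iff_infix p t).mp (by simpa using hin)
    have := h1.mpr ⟨p, hp, hinf⟩
    rw [pvScan] at hb
    simp [hb] at this
  · symm
    rw [List.any_eq_true]
    rw [pvScan] at hb
    obtain ⟨p, hp, hinf⟩ := h1.mp hb
    exact ⟨p, hp, (PySem.Chars.isIn_iff_infix p t).mpr hinf⟩

-- ===== VERDICT (by name: the statement is the Claim_ definition above) =====
theorem check_reposicao_spec : Claim_equal_check_reposicao := by
  intro row _
  unfold Spec_check_reposicao check_reposicao check_reposicao_alt
  have hk : ∀ p ∈ (["repos", "reposição", "remarc", "reagend", "repôs", "reposicao"].map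
      String.toList), p ≠ [] := by decide
  simp only [List.any_cons, List.any_nil, PySem.Str.isIn, PySem.Str.toList_lower,
    pvScan_eq _ hk, List.any_map, Function.comp_def]
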